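-- pv_equiv track=rewrite | github.com/goaziz/leetcode | Easy/hexspeak_1271.py | toHexspeak
-- ===== SOURCE A (Python) =====
-- def toHexspeak(num: str) -> str:
--     letters = ['A', 'B', 'C', 'D', 'E', 'F', 'I', 'O']
--     hex_s = hex(int(num))
--     s = ''
--     for i in hex_s[2:].upper():
--         if i == '0':
--             s += 'O'
--         elif i == '1':
--             s += 'I'
--         elif i in letters:
--             s += i
--         else:
--             return 'ERROR'
--
--     return s
-- ===== SOURCE B (Python) =====
-- def toHexspeak(num: str) -> str:
--     h = hex(int(num))[2:].upper()
--     if any(c not in 'ABCDEF01' for c in h):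
--         return 'ERROR'
--     return h.translate(str.maketrans('01', 'OI'))
-- ===== Notes on version B (the rewrite author's own statement) =====
-- stated objective: idiomatic
-- what changed: Replaced the fused per-character loop with early return and string accumulator by two separate whole-string passes: a validation pass (any character outside 'ABCDEF01' means ERROR) followed by a bulk str.translate mapping 0->O and 1->I.
import Mathlib
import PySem

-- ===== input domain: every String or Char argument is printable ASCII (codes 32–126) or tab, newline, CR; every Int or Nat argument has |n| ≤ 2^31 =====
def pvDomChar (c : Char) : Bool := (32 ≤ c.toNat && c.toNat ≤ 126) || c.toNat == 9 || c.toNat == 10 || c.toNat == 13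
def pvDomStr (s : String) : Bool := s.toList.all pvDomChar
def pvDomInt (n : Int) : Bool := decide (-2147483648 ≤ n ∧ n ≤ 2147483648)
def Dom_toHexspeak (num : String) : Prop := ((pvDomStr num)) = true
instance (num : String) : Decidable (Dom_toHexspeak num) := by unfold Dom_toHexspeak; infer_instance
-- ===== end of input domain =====

-- B separates validation (any char outside 'ABCDEF01' → ERROR) from the bulk 0→O/1→I transform,
-- instead of A's fused per-character loop with early return; same cost, more idiomatic.

-- ===== PORT A =====
-- shared hand-port of Python's hex(): lowercase digits, '0x' prefix, '-' sign
def hexDigitsList : List Char := ['0','1','2','3','4','5','6','7','8','9','a','b','c','d','e','f']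

def natToHexAux : Nat → List Char → List Char
  | 0, acc => acc
  | (n+1), acc => natToHexAux ((n+1)/16) (hexDigitsList.getD ((n+1)%16) '0' :: acc)
decreasing_by exact Nat.div_lt_self (Nat.succ_pos n) (by omega)

def pyHexChars (n : Int) : List Char :=
  (if n < 0 then ['-'] else []) ++ '0' :: 'x' ::
    (if n.natAbs = 0 then ['0'] else natToHexAux n.natAbs [])

def pvLetters : List Char := ['A', 'B', 'C', 'D', 'E', 'F', 'I', 'O']

-- A's loop: s += per character, early return 'ERROR'
def toHexspeakGo : List Char → List Char → String
  | [], s => String.ofList s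
  | i :: rest, s =>
    if i = '0' then toHexspeakGo rest (s ++ ['O'])
    else if i = '1' then toHexspeakGo rest (s ++ ['I'])
    else if i ∈ pvLetters then toHexspeakGo rest (s ++ [i])
    else "ERROR"

def toHexspeak (num : String) : String :=
  match PySem.Int.ofStr? num with
  | none => ""  -- int(num) raises ValueError: outside Pre_
  | some n => toHexspeakGo (((pyHexChars n).drop 2).map PySem.Chars.upperChar) []

-- ===== PORT B =====
def pvOkChars : List Char := ['A','B','C','D','E','F','0','1']  -- the string 'ABCDEF01'

def toHexspeak_alt (num : String) : String :=
  match PySem.Int.ofStr? num with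
  | none => ""  -- int(num) raises ValueError: outside Pre_
  | some n =>
    let h := ((pyHexChars n).drop 2).map PySem.Chars.upperChar
    if h.any (fun c => !(pvOkChars.contains c)) then "ERROR"
    else String.ofList (h.map (fun c => if c = '0' then 'O' else if c = '1' then 'I' else c))

-- ===== PRECONDITION & SPEC =====
-- Pre_ excludes exactly the strings on which int(num) raises ValueError (A raises there).
def Pre_toHexspeak (num : String) : Prop := (PySem.Int.ofStr? num).isSome = true
instance (num : String) : Decidable (Pre_toHexspeak num) := by unfold Pre_toHexspeak; infer_instance
def pvWitness_toHexspeak : String := "257"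

def Spec_toHexspeak (num : String) (out : String) : Prop := out = toHexspeak_alt num
instance (num : String) (out : String) : Decidable (Spec_toHexspeak num out) := by unfold Spec_toHexspeak; infer_instance

-- ===== CLAIM (what is proved, stated in full; the proofs are below) =====
def Claim_equal_toHexspeak : Prop := ∀ (num : String), Dom_toHexspeak num → Pre_toHexspeak num → Spec_toHexspeak num (toHexspeak num)

-- ===== LEMMAS AND PROOFS =====

-- every char natToHexAux produces is a lowercase hex digit
lemma natToHexAux_mem (n : Nat) (acc : List Char)
    (hacc : ∀ c ∈ acc, c ∈ hexDigitsList) :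
    ∀ c ∈ natToHexAux n acc, c ∈ hexDigitsList := by
  induction n, acc using natToHexAux.induct with
  | case1 acc => simpa [natToHexAux] using hacc
  | case2 n acc ih =>
    rw [natToHexAux]
    apply ih
    intro c hc
    simp only [List.mem_cons] at hc
    rcases hc with rfl | h
    · have hlt : (n+1) % 16 < hexDigitsList.length := by
        have := Nat.mod_lt (n+1) (show 0 < 16 by omega)
        simpa [hexDigitsList] using this
      rw [List.getD_eq_getElem _ _ hlt]
      exact List.getElem_mem hlt
    · exact hacc c h

lemma pyHexChars_mem (n : Int) :
    ∀ c ∈ pyHexChars n, c ∈ '-' :: 'x' :: hexDigitsList := by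
  intro c hc
  unfold pyHexChars at hc
  rcases List.mem_append.mp hc with h | h
  · split at h <;> simp_all
  · simp only [List.mem_cons] at h
    rcases h with rfl | rfl | h
    · simp [hexDigitsList]
    · simp
    · split at h
      · simp_all [hexDigitsList]
      · have := natToHexAux_mem n.natAbs [] (by simp) c h
        simp [this]

-- no char of the possible hex alphabet upper-cases to 'I' or 'O'
lemma upper_hex_not_IO : ∀ c ∈ '-' :: 'x' :: hexDigitsList,
    PySem.Chars.upperChar c ≠ 'I' ∧ PySem.Chars.upperChar c ≠ 'O' := by
  intro c hc
  fin_cases hc <;> decide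

-- A's fused loop equals B's validate-then-translate pair of passes
lemma go_eq (h : List Char) (s : List Char)
    (hIO : ∀ c ∈ h, c ≠ 'I' ∧ c ≠ 'O') :
    toHexspeakGo h s =
      if h.any (fun c => !(pvOkChars.contains c)) then "ERROR"
      else String.ofList (s ++ h.map (fun c => if c = '0' then 'O' else if c = '1' then 'I' else c)) := by
  induction h generalizing s with
  | nil => simp [toHexspeakGo]
  | cons c rest ih =>
    have hc := hIO c (by simp)
    have hrest : ∀ x ∈ rest, x ≠ 'I' ∧ x ≠ 'O' := fun x hx => hIO x (by simp [hx])
    by_cases h0 : c = '0'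
    · subst h0
      rw [toHexspeakGo, if_pos rfl, ih _ hrest]
      simp [pvOkChars]
    · by_cases h1 : c = '1'
      · subst h1
        rw [toHexspeakGo, if_neg (by decide), if_pos rfl, ih _ hrest]
        simp [pvOkChars]
      · by_cases hl : c ∈ pvLetters
        · have hok : c ∈ pvOkChars := by
            rcases hc with ⟨hI, hO⟩
            simp only [pvLetters, List.mem_cons, List.not_mem_nil, or_false] at hl
            simp only [pvOkChars, List.mem_cons, List.not_mem_nil, or_false]
            rcases hl with rfl|rfl|rfl|rfl|rfl|rfl|rfl|rfl <;> simp_all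
          rw [toHexspeakGo, if_neg h0, if_neg h1, if_pos hl, ih _ hrest]
          have htr : (if c = '0' then 'O' else if c = '1' then 'I' else c) = c := by
            simp [h0, h1]
          simp [hok, htr]
        · have hnot : c ∉ pvOkChars := by
            simp only [pvOkChars, pvLetters, List.mem_cons, List.not_mem_nil, or_false] at hl ⊢
            tauto
          rw [toHexspeakGo, if_neg h0, if_neg h1, if_neg hl]
          simp [hnot]

-- ===== VERDICT (by name: the statement is the Claim_ definition above) =====
theorem toHexspeak_spec : Claim_equal_toHexspeak := by
  intro num _ hpre
  unfold Spec_toHexspeak toHexspeak toHexspeak_alt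
  rcases hn : PySem.Int.ofStr? num with _ | n
  · simp [Pre_toHexspeak, hn] at hpre
  · have hIO : ∀ c ∈ ((pyHexChars n).drop 2).map PySem.Chars.upperChar,
        c ≠ 'I' ∧ c ≠ 'O' := by
      intro c hc
      rcases List.mem_map.mp hc with ⟨d, hd, rfl⟩
      exact upper_hex_not_IO d (pyHexChars_mem n d (List.mem_of_mem_drop hd))
    simpa using go_eq _ [] hIO
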